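-- pv_equiv track=rewrite | github.com/minhnion/ai_documents_management | app/services/pipeline/landingai_ocr_service.py | _find_overlap_cutoff
-- ===== SOURCE A (Python) =====
-- def _find_overlap_cutoff(prev_md: str, curr_md: str, search_chars: int = 4000) -> int:
--     """Tìm vị trí kết thúc phần trùng lặp trong curr_md so với prev_md."""
--     tail = prev_md[-search_chars:].strip()
--     head = curr_md[:search_chars * 2]
--     best = 0
--     for window in [300, 200, 150, 100, 60]:
--         step = max(window // 3, 20)
--         for i in range(0, len(tail) - window, step):
--             fragment = tail[i : i + window].strip()
--             if len(fragment) < 40: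
--                 continue
--             pos = head.find(fragment)
--             if pos != -1:
--                 best = max(best, pos + len(fragment))
--     return best
-- ===== SOURCE B (Python) =====
-- def _find_overlap_cutoff(prev_md: str, curr_md: str, search_chars: int = 4000) -> int:
--     tail = prev_md[-search_chars:].strip()
--     head = curr_md[:search_chars * 2]
--     frags = []
--     for w in (300, 200, 150, 100, 60):
--         for i in range(0, len(tail) - w, max(w // 3, 20)):
--             f = tail[i:i + w].strip()
--             if len(f) >= 40:
--                 frags.append(f)
--     best = 0
--     for L in dict.fromkeys(len(f) for f in frags):
--         # index: each length-L substring of head -> its first occurrence position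
--         first_at = {}
--         for p in range(len(head) - L + 1):
--             s = head[p:p + L]
--             if s not in first_at:
--                 first_at[s] = p
--         for f in frags:
--             if len(f) == L:
--                 p = first_at.get(f, -1)
--                 if p >= 0 and p + L > best:
--                     best = p + L
--     return best
-- ===== Notes on version B (the rewrite author's own statement) =====
-- stated objective: alternative
-- what changed: Instead of calling head.find for every windowed fragment, B collects the qualifying fragments once and, for each distinct fragment length L, builds a dictionary mapping every length-L substring of head to its first occurrence, answering each fragment by a single lookup; correct because head.find(f) is exactly the first position whose length-|f| slice equals f, and the running max is order-insensitive.
import Mathlib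
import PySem

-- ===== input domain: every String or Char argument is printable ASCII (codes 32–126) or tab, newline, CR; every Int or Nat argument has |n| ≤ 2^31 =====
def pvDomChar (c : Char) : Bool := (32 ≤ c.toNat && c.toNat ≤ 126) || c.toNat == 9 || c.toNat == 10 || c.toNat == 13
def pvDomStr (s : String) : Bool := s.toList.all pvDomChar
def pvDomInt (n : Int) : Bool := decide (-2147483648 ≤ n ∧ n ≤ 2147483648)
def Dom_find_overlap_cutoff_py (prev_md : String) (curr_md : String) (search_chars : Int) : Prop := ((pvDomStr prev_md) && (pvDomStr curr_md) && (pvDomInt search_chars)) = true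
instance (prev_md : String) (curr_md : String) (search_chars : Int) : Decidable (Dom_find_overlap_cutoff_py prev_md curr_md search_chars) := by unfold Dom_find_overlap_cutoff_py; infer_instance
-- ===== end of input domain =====

-- B replaces A's per-fragment substring scans (head.find for every fragment) by a
-- first-occurrence index of head built once per distinct fragment length, queried by
-- dictionary lookup ('alternative': a different algorithm, not measured faster here).

-- ===== PORT A =====
def find_overlap_cutoff_py (prev_md : String) (curr_md : String) (search_chars : Int) : Int :=
  let tail := PySem.Str.strip (PySem.Str.slice prev_md (some (-search_chars)) none)
  let head := PySem.Str.slice curr_md none (some (search_chars * 2))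
  [(300 : Int), 200, 150, 100, 60].foldl (fun best window =>
    let step := max (PySem.Int.floordiv window 3) 20
    (PySem.List.pyRange 0 (PySem.Str.len tail - window) step).foldl (fun best i =>
      let fragment := PySem.Str.strip (PySem.Str.slice tail (some i) (some (i + window)))
      if PySem.Str.len fragment < 40 then best
      else
        let pos := PySem.Str.find head fragment
        if pos ≠ -1 then max best (pos + PySem.Str.len fragment) else best) best) 0

-- ===== PORT B =====
-- collect the qualifying fragments; then, for each distinct fragment length L, build a
-- dictionary mapping each length-L substring of head to its first position, and answer
-- every length-L fragment by one lookup (Source B's first_at index).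
def find_overlap_cutoff_py_alt (prev_md : String) (curr_md : String) (search_chars : Int) : Int :=
  let tail := PySem.Str.strip (PySem.Str.slice prev_md (some (-search_chars)) none)
  let head := PySem.Str.slice curr_md none (some (search_chars * 2))
  let frags := [(300 : Int), 200, 150, 100, 60].foldl (fun acc w =>
    (PySem.List.pyRange 0 (PySem.Str.len tail - w) (max (PySem.Int.floordiv w 3) 20)).foldl
      (fun acc i =>
        let f := PySem.Str.strip (PySem.Str.slice tail (some i) (some (i + w)))
        if 40 ≤ PySem.Str.len f then acc ++ [f] else acc) acc) []
  (PySem.List.dedup (frags.map (fun f => PySem.Str.len f))).foldl (fun best L =>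
    let firstAt := (PySem.List.pyRange 0 (PySem.Str.len head - L + 1) 1).foldl
      (fun d p =>
        let s := PySem.Str.slice head (some p) (some (p + L))
        if d.contains s then d else d.insert s p) PySem.Dict.empty
    frags.foldl (fun best f =>
      if PySem.Str.len f == L then
        let p := firstAt.getD f (-1)
        if 0 ≤ p ∧ best < p + L then p + L else best
      else best) best) 0

-- ===== PRECONDITION & SPEC =====
def Spec_find_overlap_cutoff_py (prev_md : String) (curr_md : String) (search_chars : Int) (out : Int) : Prop := out = find_overlap_cutoff_py_alt prev_md curr_md search_chars
instance (prev_md : String) (curr_md : String) (search_chars : Int) (out : Int) : Decidable (Spec_find_overlap_cutoff_py prev_md curr_md search_chars out) := by unfold Spec_find_overlap_cutoff_py; infer_instance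

-- ===== CLAIM (what is proved, stated in full; the proofs are below) =====
def Claim_equal_find_overlap_cutoff_py : Prop := ∀ (prev_md : String) (curr_md : String) (search_chars : Int), Dom_find_overlap_cutoff_py prev_md curr_md search_chars → Spec_find_overlap_cutoff_py prev_md curr_md search_chars (find_overlap_cutoff_py prev_md curr_md search_chars)

-- ===== LEMMAS AND PROOFS =====

-- A's loop body contribution for one fragment: max in the end position if found
def pvStep (head : String) (b : Int) (f : String) : Int :=
  if PySem.Str.find head f ≠ -1 then max b (PySem.Str.find head f + PySem.Str.len f) else b

-- B's fragment-collection loop, named for the proofs (same term as in the port)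
def pvFragsImpl (tail : String) : List String :=
  [(300 : Int), 200, 150, 100, 60].foldl (fun acc w =>
    (PySem.List.pyRange 0 (PySem.Str.len tail - w) (max (PySem.Int.floordiv w 3) 20)).foldl
      (fun acc i =>
        let f := PySem.Str.strip (PySem.Str.slice tail (some i) (some (i + w)))
        if 40 ≤ PySem.Str.len f then acc ++ [f] else acc) acc) []

-- the candidate fragments as a flat list, and the qualifying (≥ 40 chars) ones
def pvFrag (tail : String) (w i : Int) : String :=
  PySem.Str.strip (PySem.Str.slice tail (some i) (some (i + w)))

def pvCand (tail : String) : List String :=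
  [(300 : Int), 200, 150, 100, 60].flatMap (fun w =>
    (PySem.List.pyRange 0 (PySem.Str.len tail - w) (max (PySem.Int.floordiv w 3) 20)).map
      (fun i => pvFrag tail w i))

def pvQual (tail : String) : List String :=
  (pvCand tail).filter (fun f => decide (40 ≤ PySem.Str.len f))

-- find? over range returns the first index satisfying the predicate
theorem pv_find?_range_eq_some (p : Nat → Bool) :
    ∀ (n k : Nat), k < n → p k = true → (∀ j < k, p j = false) →
      (List.range n).find? p = some k := by
  intro n
  induction n with
  | zero => intro k hk; omega
  | succ m ih =>
    intro k hk hp hmin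
    rw [List.range_succ, List.find?_append]
    by_cases hkm : k < m
    · rw [ih k hkm hp hmin, Option.some_or]
    · have hkm' : k = m := by omega
      have hnone : (List.range m).find? p = none := by
        rw [List.find?_eq_none]
        intro j hj
        simp only [List.mem_range] at hj
        simp [hmin j (by omega)]
      rw [hnone, Option.none_or]
      subst hkm'
      simp [hp]

-- an 'insert only if absent' fold: lookup = original lookup, else first inserting position
theorem pv_fold_insertIfAbsent_get? (g : Int → String) :
    ∀ (ps : List Int) (d : PySem.Dict String Int) (k : String),
      (ps.foldl (fun d p => if d.contains (g p) then d else d.insert (g p) p) d).get? k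
        = (d.get? k).or (ps.find? (fun p => g p == k)) := by
  intro ps
  induction ps with
  | nil => intro d k; simp
  | cons p t ih =>
    intro d k
    rw [List.foldl_cons]
    by_cases hc : d.contains (g p) = true
    · rw [if_pos hc, ih]
      by_cases hk : (g p == k) = true
      · have hkk : g p = k := beq_iff_eq.mp hk
        subst hkk
        have hs : (d.get? (g p)).isSome := by
          rw [← PySem.Dict.contains_eq_isSome_get?]; exact hc
        obtain ⟨v, hv⟩ := Option.isSome_iff_exists.mp hs
        rw [hv, List.find?_cons_of_pos (p := fun q => g q == g p) hk, Option.some_or,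
          Option.some_or]
      · rw [List.find?_cons_of_neg (p := fun q => g q == k) hk]
    · rw [if_neg hc, ih]
      by_cases hk : (g p == k) = true
      · have hkk : g p = k := beq_iff_eq.mp hk
        subst hkk
        have hd : d.get? (g p) = none := by
          rw [PySem.Dict.contains_eq_isSome_get?] at hc
          exact Option.not_isSome_iff_eq_none.mp hc
        rw [PySem.Dict.get?_insert_self, hd, List.find?_cons_of_pos (p := fun q => g q == g p) hk,
          Option.some_or, Option.none_or]
      · have hne : k ≠ g p := fun h => hk (beq_iff_eq.mpr h.symm)
        rw [PySem.Dict.get?_insert_of_ne d p hne, List.find?_cons_of_neg (p := fun q => g q == k) hk]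

-- a fragment equals the length-|f| slice of head at q iff f is a prefix of head.drop q
theorem pv_slice_beq (head f : String) (q : Nat) :
    (PySem.Str.slice head (some ((q : Int))) (some ((q : Int) + PySem.Str.len f)) == f) = true
      ↔ f.toList <+: head.toList.drop q := by
  rw [beq_iff_eq, ← String.toList_inj, PySem.Str.toList_slice,
    PySem.Chars.slice_eq_listSlice, PySem.Str.len_eq,
    PySem.List.slice_natCast_add head.toList q f.toList.length]
  constructor
  · intro h
    rw [List.prefix_iff_eq_take]
    exact h.symm
  · intro h
    rw [List.prefix_iff_eq_take] at h
    exact h.symm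

-- the first-occurrence index answers exactly head.find(f) (or -1 when absent)
theorem pv_lookup (head f : String) (L : Int) (hL : L = PySem.Str.len f) :
    ((PySem.List.pyRange 0 (PySem.Str.len head - L + 1) 1).foldl
       (fun d p =>
         let s := PySem.Str.slice head (some p) (some (p + L))
         if d.contains s then d else d.insert s p) PySem.Dict.empty).getD f (-1)
      = PySem.Str.find head f := by
  subst hL
  rw [PySem.Dict.getD_eq_get?_getD,
    pv_fold_insertIfAbsent_get? (fun p => PySem.Str.slice head (some p) (some (p + PySem.Str.len f)))]
  rw [PySem.Dict.get?_empty, Option.none_or]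
  rw [PySem.List.pyRange_one, List.find?_map]
  have hq : ((fun p => PySem.Str.slice head (some p) (some (p + PySem.Str.len f)) == f) ∘
      (fun k : Nat => (0 : Int) + ↑k))
      = (fun q : Nat => PySem.Str.slice head (some ((q : Int))) (some ((q : Int) + PySem.Str.len f)) == f) := by
    funext q; simp [Function.comp]
  rw [hq]
  by_cases hfind : PySem.Str.find head f = -1
  · have hnone : (List.range (PySem.Str.len head - PySem.Str.len f + 1 - 0).toNat).find?
        (fun q : Nat => PySem.Str.slice head (some ((q : Int))) (some ((q : Int) + PySem.Str.len f)) == f)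
        = none := by
      rw [List.find?_eq_none]
      intro q _ hpred
      have hpre := (pv_slice_beq head f q).mp hpred
      have hinf : f.toList <:+: head.toList :=
        List.IsInfix.trans hpre.isInfix (List.drop_suffix q head.toList).isInfix
      rw [PySem.Str.find_eq, PySem.Chars.find_eq_neg_one_iff] at hfind
      exact hfind hinf
    rw [hnone]
    simp only [Option.map_none, Option.getD_none]
    exact hfind.symm
  · have h0 : 0 ≤ PySem.Str.find head f := by
      have := PySem.Chars.neg_one_le_find head.toList f.toList
      rw [PySem.Str.find_eq] at hfind ⊢
      omega
    rw [PySem.Str.find_eq] at h0 ⊢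
    obtain ⟨hpre, hmin⟩ := PySem.Chars.find_spec h0
    set k := (PySem.Chars.find head.toList f.toList).toNat with hk
    have hlen : k + f.toList.length ≤ head.toList.length := by
      have h1 := hpre.length_le
      rw [List.length_drop] at h1
      have h2 : (k : Int) ≤ head.toList.length := by
        have := PySem.Chars.find_le_length head.toList f.toList
        omega
      omega
    have hsome : (List.range (PySem.Str.len head - PySem.Str.len f + 1 - 0).toNat).find?
        (fun q : Nat => PySem.Str.slice head (some ((q : Int))) (some ((q : Int) + PySem.Str.len f)) == f)
        = some k := by
      apply pv_find?_range_eq_some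
      · rw [PySem.Str.len_eq, PySem.Str.len_eq]
        omega
      · exact (pv_slice_beq head f k).mpr hpre
      · intro j hj
        rw [← Bool.not_eq_true]
        intro hpred
        exact hmin j hj ((pv_slice_beq head f j).mp hpred)
    rw [hsome]
    simp only [Option.map_some, Option.getD_some]
    omega

-- A's loop body is the filtered pvStep body
theorem pv_bodyA (head : String) (b : Int) (f : String) :
    (if PySem.Str.len f < 40 then b
     else
       let pos := PySem.Str.find head f
       if pos ≠ -1 then max b (pos + PySem.Str.len f) else b)
      = if decide (40 ≤ PySem.Str.len f) = true then pvStep head b f else b := by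
  show (if PySem.Str.len f < 40 then b
    else if PySem.Str.find head f ≠ -1 then max b (PySem.Str.find head f + PySem.Str.len f) else b) = _
  by_cases h : 40 ≤ PySem.Str.len f
  · rw [if_neg (show ¬ PySem.Str.len f < 40 by omega),
      if_pos (show decide (40 ≤ PySem.Str.len f) = true from decide_eq_true h)]
    rfl
  · rw [if_pos (show PySem.Str.len f < 40 by omega),
      if_neg (show ¬ decide (40 ≤ PySem.Str.len f) = true from
        fun ht => h (of_decide_eq_true ht))]

-- A's nested loops compute the running max of pvStep over the qualifying fragments
theorem pv_A_eq (tail head : String) :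
    [(300 : Int), 200, 150, 100, 60].foldl (fun best window =>
      let step := max (PySem.Int.floordiv window 3) 20
      (PySem.List.pyRange 0 (PySem.Str.len tail - window) step).foldl (fun best i =>
        let fragment := PySem.Str.strip (PySem.Str.slice tail (some i) (some (i + window)))
        if PySem.Str.len fragment < 40 then best
        else
          let pos := PySem.Str.find head fragment
          if pos ≠ -1 then max best (pos + PySem.Str.len fragment) else best) best) 0
      = (pvQual tail).foldl (pvStep head) 0 := by
  rw [pvQual, List.foldl_filter, pvCand, List.foldl_flatMap]
  apply List.foldl_ext
  intro b w _
  simp only [List.foldl_map]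
  apply List.foldl_ext
  intro b' i _
  exact pv_bodyA head b' (pvFrag tail w i)

-- B's collection body in filtered form
theorem pv_bodyC (tail : String) (w i : Int) (acc : List String) :
    (if 40 ≤ PySem.Str.len (pvFrag tail w i) then acc ++ [pvFrag tail w i] else acc)
      = if decide (40 ≤ PySem.Str.len (pvFrag tail w i)) = true
        then acc ++ [pvFrag tail w i] else acc := by
  by_cases h : 40 ≤ PySem.Str.len (pvFrag tail w i)
  · rw [if_pos h, if_pos (decide_eq_true h)]
  · rw [if_neg h, if_neg (show ¬ decide (40 ≤ PySem.Str.len (pvFrag tail w i)) = true from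
      fun ht => h (of_decide_eq_true ht))]

-- B's collection loop builds exactly the qualifying fragments
theorem pv_frags_eq (tail : String) : pvFragsImpl tail = pvQual tail := by
  rw [pvFragsImpl, pvQual, pvCand]
  refine Eq.trans (List.foldl_ext _
    (fun (acc : List String) (w : Int) =>
      ((PySem.List.pyRange 0 (PySem.Str.len tail - w) (max (PySem.Int.floordiv w 3) 20)).map
          (fun i => pvFrag tail w i)).foldl
        (fun acc f => if decide (40 ≤ PySem.Str.len f) = true then acc ++ [f] else acc) acc)
    [] ?_) ?_
  · intro acc w _
    simp only [List.foldl_map]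
    apply List.foldl_ext
    intro acc' i _
    exact pv_bodyC tail w i acc' 
  · rw [← List.foldl_flatMap,
      PySem.List.foldl_append_if (fun f => decide (40 ≤ PySem.Str.len f)) (fun f => f)]
    simp [List.map_id']

-- grouping the fragments by their length is a permutation of the fragment list
theorem pv_count_flatMap (qual : List String) :
    ∀ (Ls : List Int), Ls.Nodup → ∀ (f : String),
      (Ls.flatMap (fun L => qual.filter (fun x => PySem.Str.len x == L))).count f
        = if PySem.Str.len f ∈ Ls then qual.count f else 0 := by
  intro Ls
  induction Ls with
  | nil => intro _ f; simp
  | cons L t ih =>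
    intro hnd f
    rw [List.flatMap_cons, List.count_append, ih hnd.of_cons]
    by_cases hL : (PySem.Str.len f == L) = true
    · have hLL : PySem.Str.len f = L := beq_iff_eq.mp hL
      rw [List.count_filter (p := fun x => PySem.Str.len x == L) (a := f) hL]
      have hnot : PySem.Str.len f ∉ t := by
        rw [hLL]; exact (List.nodup_cons.mp hnd).1
      rw [if_neg hnot, if_pos (show PySem.Str.len f ∈ L :: t by
        rw [List.mem_cons]; exact Or.inl hLL)]
      omega
    · have hzero : (qual.filter (fun x => PySem.Str.len x == L)).count f = 0 := by
        rw [List.count_eq_zero]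
        intro hmem
        exact hL (List.of_mem_filter (p := fun x => PySem.Str.len x == L) hmem)
      rw [hzero]
      have hne : PySem.Str.len f ≠ L := fun h => hL (beq_iff_eq.mpr h)
      by_cases hmem : PySem.Str.len f ∈ t
      · rw [if_pos hmem, if_pos (show PySem.Str.len f ∈ L :: t by
          rw [List.mem_cons]; exact Or.inr hmem)]
        omega
      · rw [if_neg hmem, if_neg (show ¬ PySem.Str.len f ∈ L :: t from fun hx =>
          Or.elim (List.mem_cons.mp hx) (fun h1 => hne h1) (fun h2 => hmem h2))]

theorem pv_perm (qual : List String) :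
    ((PySem.List.dedup (qual.map (fun f => PySem.Str.len f))).flatMap
        (fun L => qual.filter (fun x => PySem.Str.len x == L))).Perm qual := by
  rw [List.perm_iff_count]
  intro f
  rw [pv_count_flatMap qual _ (PySem.List.nodup_dedup _) f]
  by_cases hf : f ∈ qual
  · rw [if_pos ((PySem.List.mem_dedup _ _).mpr (List.mem_map_of_mem hf))]
  · rw [List.count_eq_zero.mpr hf]
    split <;> rfl

-- pvStep is right-commutative (order of fragments does not matter for the running max)
theorem pv_step_comm (head : String) (z : Int) (x y : String) :
    pvStep head (pvStep head z x) y = pvStep head (pvStep head z y) x := by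
  unfold pvStep
  split_ifs <;> omega

-- B's per-fragment body, after the index lookup is resolved to head.find
theorem pv_bodyB (head : String) (L b : Int) (f : String) :
    (if PySem.Str.len f == L then
      (if 0 ≤ ((PySem.List.pyRange 0 (PySem.Str.len head - L + 1) 1).foldl
            (fun d p =>
              let s := PySem.Str.slice head (some p) (some (p + L))
              if d.contains s then d else d.insert s p) PySem.Dict.empty).getD f (-1)
          ∧ b < ((PySem.List.pyRange 0 (PySem.Str.len head - L + 1) 1).foldl
            (fun d p =>
              let s := PySem.Str.slice head (some p) (some (p + L))
              if d.contains s then d else d.insert s p) PySem.Dict.empty).getD f (-1) + L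
        then ((PySem.List.pyRange 0 (PySem.Str.len head - L + 1) 1).foldl
            (fun d p =>
              let s := PySem.Str.slice head (some p) (some (p + L))
              if d.contains s then d else d.insert s p) PySem.Dict.empty).getD f (-1) + L
        else b)
    else b)
      = if (PySem.Str.len f == L) = true then pvStep head b f else b := by
  by_cases hL : (PySem.Str.len f == L) = true
  · rw [if_pos hL, if_pos hL]
    have hLL : L = PySem.Str.len f := (beq_iff_eq.mp hL).symm
    rw [pv_lookup head f L hLL]
    unfold pvStep
    by_cases hfind : PySem.Str.find head f = -1
    · rw [if_neg (by omega), if_neg (not_not_intro hfind)]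
    · have h0 : 0 ≤ PySem.Str.find head f := by
        have := PySem.Chars.neg_one_le_find head.toList f.toList
        rw [PySem.Str.find_eq] at hfind ⊢
        omega
      rw [if_pos hfind, hLL]
      by_cases hb : b < PySem.Str.find head f + PySem.Str.len f
      · rw [if_pos ⟨h0, hb⟩]; omega
      · rw [if_neg (by omega)]; omega
  · rw [if_neg hL, if_neg hL]

-- B's per-length pass over the fragments is the pvStep fold over that length's fragments
theorem pv_inner_eq (head : String) (frags : List String) (L : Int) (best : Int) :
    frags.foldl (fun best f =>
      if PySem.Str.len f == L then
        let p := ((PySem.List.pyRange 0 (PySem.Str.len head - L + 1) 1).foldl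
          (fun d p =>
            let s := PySem.Str.slice head (some p) (some (p + L))
            if d.contains s then d else d.insert s p) PySem.Dict.empty).getD f (-1)
        if 0 ≤ p ∧ best < p + L then p + L else best
      else best) best
      = (frags.filter (fun x => PySem.Str.len x == L)).foldl (pvStep head) best := by
  rw [List.foldl_filter]
  apply List.foldl_ext
  intro b f _
  exact pv_bodyB head L b f

-- B's whole computation equals the pvStep fold over the qualifying fragments
set_option maxHeartbeats 2000000 in
theorem pv_B_eq (tail head : String) :
    (PySem.List.dedup ((pvFragsImpl tail).map (fun f => PySem.Str.len f))).foldl (fun best L =>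
      let firstAt := (PySem.List.pyRange 0 (PySem.Str.len head - L + 1) 1).foldl
        (fun d p =>
          let s := PySem.Str.slice head (some p) (some (p + L))
          if d.contains s then d else d.insert s p) PySem.Dict.empty
      (pvFragsImpl tail).foldl (fun best f =>
        if PySem.Str.len f == L then
          let p := firstAt.getD f (-1)
          if 0 ≤ p ∧ best < p + L then p + L else best
        else best) best) 0
      = (pvQual tail).foldl (pvStep head) 0 := by
  rw [pv_frags_eq tail]
  refine Eq.trans (List.foldl_ext _
    (fun (b L : Int) =>
      ((pvQual tail).filter (fun x => PySem.Str.len x == L)).foldl (pvStep head) b)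
    0 ?_) ?_
  · intro b L _
    exact pv_inner_eq head (pvQual tail) L b
  · rw [← List.foldl_flatMap]
    exact List.Perm.foldl_eq' (pv_perm (pvQual tail))
      (fun x _ y _ z => pv_step_comm head z x y) 0

-- ===== VERDICT (by name: the statement is the Claim_ definition above) =====
set_option maxHeartbeats 2000000 in
theorem find_overlap_cutoff_py_spec : Claim_equal_find_overlap_cutoff_py := by
  intro prev_md curr_md search_chars _
  show find_overlap_cutoff_py prev_md curr_md search_chars
    = find_overlap_cutoff_py_alt prev_md curr_md search_chars
  rw [find_overlap_cutoff_py, find_overlap_cutoff_py_alt]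
  exact (pv_A_eq (PySem.Str.strip (PySem.Str.slice prev_md (some (-search_chars)) none))
      (PySem.Str.slice curr_md none (some (search_chars * 2)))).trans
    (pv_B_eq (PySem.Str.strip (PySem.Str.slice prev_md (some (-search_chars)) none))
      (PySem.Str.slice curr_md none (some (search_chars * 2)))).symm
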